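-- pv_equiv track=rewrite | github.com/galkev/video-depth-estimation | src/tools/tools.py | transpose_flat_list
-- ===== SOURCE A (Python) =====
-- def transpose_flat_list(x, n):
--     x_t = []
--
--     m = len(x) // n
--     assert len(x) == m * n
--
--     for i in range(n):
--         for j in range(m):
--             x_t.append(x[j * n + i])
--
--     return x_t
-- ===== SOURCE B (Python) =====
-- def transpose_flat_list(x, n):
--     m = len(x) // n
--     assert len(x) == m * n
--     rows = [x[r * n:(r + 1) * n] for r in range(m)]
--     return [v for col in zip(*rows) for v in col]
-- ===== Notes on version B (the rewrite author's own statement) =====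
-- stated objective: idiomatic
-- what changed: Replaces the flat double index loop (x[j*n+i]) with building the m rows by slicing and transposing them with zip(*rows), flattening the resulting columns.
import Mathlib
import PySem

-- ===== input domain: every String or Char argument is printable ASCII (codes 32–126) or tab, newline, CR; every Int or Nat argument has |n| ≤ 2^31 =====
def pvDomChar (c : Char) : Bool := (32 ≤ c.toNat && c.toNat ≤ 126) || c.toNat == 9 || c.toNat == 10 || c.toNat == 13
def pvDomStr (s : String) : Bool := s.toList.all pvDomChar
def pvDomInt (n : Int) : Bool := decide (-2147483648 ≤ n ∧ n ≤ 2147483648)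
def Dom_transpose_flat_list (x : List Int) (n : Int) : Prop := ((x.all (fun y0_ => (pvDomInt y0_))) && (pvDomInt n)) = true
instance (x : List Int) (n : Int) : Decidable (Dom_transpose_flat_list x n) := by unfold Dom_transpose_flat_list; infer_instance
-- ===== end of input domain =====

-- B builds the m rows by slicing and transposes them zip-style (heads/tails), instead of A's flat double index loop; same asymptotic cost.


-- ===== PORT A =====

def transpose_flat_list (x : List Int) (n : Int) : List Int :=
  let m := PySem.Int.floordiv (x.length : Int) n
  (PySem.List.pyRange 0 n 1).foldl (fun xt i =>
    (PySem.List.pyRange 0 m 1).foldl (fun xt j =>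
      xt ++ [PySem.List.pyGetD x (j * n + i) 0]) xt) []

def pvZipCols : Nat → List (List Int) → List (List Int)
  | 0, _ => []
  | k + 1, rows =>
    if rows.all (fun r => !r.isEmpty)
    then rows.map (fun r => r.headD 0) :: pvZipCols k (rows.map List.tail)
    else []

def transpose_flat_list_alt (x : List Int) (n : Int) : List Int :=
  let m := PySem.Int.floordiv (x.length : Int) n
  let rows := (PySem.List.pyRange 0 m 1).map
    (fun r => PySem.List.slice x (some (r * n)) (some ((r + 1) * n)))
  match rows with
  | [] => []
  | r0 :: _ => (pvZipCols r0.length rows).flatten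


-- ===== PRECONDITION & SPEC =====
-- Pre_ excludes exactly the inputs on which A raises: n = 0 (ZeroDivisionError) and
-- lengths not divisible by n (AssertionError); A returns on every other input.
def Pre_transpose_flat_list (x : List Int) (n : Int) : Prop :=
  n ≠ 0 ∧ n ∣ (x.length : Int)
instance (x : List Int) (n : Int) : Decidable (Pre_transpose_flat_list x n) := by
  unfold Pre_transpose_flat_list; infer_instance

def pvWitness_transpose_flat_list : List Int × Int := ([1, 2, 3, 4, 5, 6], 2)

def Spec_transpose_flat_list (x : List Int) (n : Int) (out : List Int) : Prop :=
  out = transpose_flat_list_alt x n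
instance (x : List Int) (n : Int) (out : List Int) : Decidable (Spec_transpose_flat_list x n out) := by
  unfold Spec_transpose_flat_list; infer_instance

-- ===== CLAIM (what is proved, stated in full; the proofs are below) =====
def Claim_equal_transpose_flat_list : Prop :=
  ∀ (x : List Int) (n : Int), Dom_transpose_flat_list x n →
    Pre_transpose_flat_list x n →
    Spec_transpose_flat_list x n (transpose_flat_list x n)

-- ===== LEMMAS AND PROOFS =====

-- canonical form both ports are reduced to (column i is [x[j*n+i] for j < m])
def pvCanon (x : List Int) (n m : Nat) : List Int :=
  (List.range n).flatMap (fun i => (List.range m).map (fun j => x.getD (j * n + i) 0))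

lemma pvZipCols_spec (L : Nat) (rows : List (List Int)) (h : ∀ r ∈ rows, r.length = L) :
    pvZipCols L rows = (List.range L).map (fun i => rows.map (fun r => r.getD i 0)) := by
  induction L generalizing rows with
  | zero => simp [pvZipCols]
  | succ k ih =>
    have hne : rows.all (fun r => !r.isEmpty) = true := by
      simp only [List.all_eq_true]
      intro r hr
      have hl := h r hr
      cases r with
      | nil => simp at hl
      | cons a t => simp
    rw [pvZipCols, if_pos hne, ih (rows.map List.tail)
      (by intro r hr; simp only [List.mem_map] at hr
          obtain ⟨s, hs, rfl⟩ := hr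
          have hl := h s hs
          cases s with
          | nil => simp at hl
          | cons a t => simpa using hl)]
    rw [List.range_succ_eq_map]
    simp only [List.map_cons, List.map_map, List.cons.injEq]
    constructor
    · apply List.map_congr_left
      intro r hr
      have hl := h r hr
      cases r with
      | nil => simp at hl
      | cons a t => simp
    · apply List.map_congr_left
      intro i hi
      simp only [Function.comp]
      apply List.map_congr_left
      intro r hr
      have hl := h r hr
      cases r with
      | nil => simp at hl
      | cons a t => simp

lemma pv_neg_case (x : List Int) (n : Int) (hn : n < 0) :
    PySem.Int.floordiv (x.length : Int) n ≤ 0 := by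
  have hmod := PySem.Int.mod_neg_bounds (x.length : Int) hn
  have heq := PySem.Int.floordiv_mul_add_mod (x.length : Int) n
  by_contra hpos
  push Not at hpos
  nlinarith [Int.natCast_nonneg x.length]

lemma pvA_canon (x : List Int) (n' m' : Nat)
    (hm : PySem.Int.floordiv (x.length : Int) (n' : Int) = (m' : Int)) :
    transpose_flat_list x (n' : Int) = pvCanon x n' m' := by
  unfold transpose_flat_list pvCanon
  simp only [hm]
  rw [show (fun (xt : List Int) (i : Int) =>
      (PySem.List.pyRange 0 (m' : Int) 1).foldl (fun xt j =>
        xt ++ [PySem.List.pyGetD x (j * (n' : Int) + i) 0]) xt)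
    = fun xt i => xt ++ (PySem.List.pyRange 0 (m' : Int) 1).map
        (fun j => PySem.List.pyGetD x (j * (n' : Int) + i) 0) from
    funext fun xt => funext fun i => PySem.List.foldl_append_singleton_eq_map _ _ _]
  rw [PySem.List.foldl_append_eq_flatMap]
  rw [PySem.List.pyRange_zero_nat, PySem.List.pyRange_zero_nat]
  simp only [List.flatMap_map, List.map_map, List.nil_append]
  apply List.flatMap_congr
  intro i _
  apply List.map_congr_left
  intro j _
  simp only [Function.comp]
  rw [show ((j : Int) * (n' : Int) + (i : Int)) = ((j * n' + i : Nat) : Int) by push_cast; ring,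
    PySem.List.pyGetD_natCast]

lemma pvB_canon (x : List Int) (n' m' : Nat) (hn : 0 < n') (hlen : x.length = m' * n')
    (hm : PySem.Int.floordiv (x.length : Int) (n' : Int) = (m' : Int)) :
    transpose_flat_list_alt x (n' : Int) = pvCanon x n' m' := by
  unfold transpose_flat_list_alt
  simp only [hm]
  have hrows : ((PySem.List.pyRange 0 (m' : Int) 1).map
      (fun r => PySem.List.slice x (some (r * (n' : Int))) (some ((r + 1) * (n' : Int)))))
      = (List.range m').map (fun r => (x.drop (r * n')).take n') := by
    rw [PySem.List.pyRange_zero_nat, List.map_map]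
    apply List.map_congr_left
    intro r _
    simp only [Function.comp]
    rw [show ((r : Int) * (n' : Int)) = ((r * n' : Nat) : Int) by push_cast; ring,
        show (((r : Nat) : Int) + 1) * (n' : Int) = ((r * n' : Nat) : Int) + (n' : Int) by push_cast; ring,
        PySem.List.slice_natCast_add]
  rw [hrows]
  have hrowlen : ∀ r ∈ (List.range m').map (fun r => (x.drop (r * n')).take n'), r.length = n' := by
    intro r hr
    simp only [List.mem_map, List.mem_range] at hr
    obtain ⟨k, hk, rfl⟩ := hr
    simp only [List.length_take, List.length_drop, hlen]
    have : k * n' + n' ≤ m' * n' := by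
      calc k * n' + n' = (k + 1) * n' := by ring
        _ ≤ m' * n' := Nat.mul_le_mul_right n' hk
    omega
  rcases hR : (List.range m').map (fun r => (x.drop (r * n')).take n') with _ | ⟨r0, rest⟩
  · -- m' = 0
    have hm0 : m' = 0 := by
      by_contra h0
      have : 0 ∈ List.range m' := List.mem_range.mpr (Nat.pos_of_ne_zero h0)
      have : ((x.drop (0 * n')).take n') ∈ (List.range m').map (fun r => (x.drop (r * n')).take n') :=
        List.mem_map_of_mem this
      rw [hR] at this
      simp at this
    simp [pvCanon, hm0]
  · have hr0 : r0.length = n' := by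
      apply hrowlen
      rw [hR]; exact List.mem_cons_self
    show (pvZipCols r0.length (r0 :: rest)).flatten = pvCanon x n' m'
    rw [hr0, ← hR, pvZipCols_spec n' _ hrowlen]
    unfold pvCanon
    rw [List.flatMap_def]
    congr 1
    apply List.map_congr_left
    intro i hi
    rw [List.map_map]
    apply List.map_congr_left
    intro r hr
    simp only [Function.comp, List.mem_range] at hr ⊢
    have hi' : i < n' := List.mem_range.mp hi
    rw [List.getD, List.getD, List.getElem?_take_of_lt hi', List.getElem?_drop]

-- ===== VERDICT (by name: the statement is the Claim_ definition above) =====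
theorem transpose_flat_list_spec : Claim_equal_transpose_flat_list := by
  intro x n _ hpre
  obtain ⟨hn0, hdvd⟩ := hpre
  unfold Spec_transpose_flat_list
  rcases lt_or_gt_of_ne hn0 with hneg | hpos
  · -- n < 0: both loops are over empty ranges and return []
    unfold transpose_flat_list transpose_flat_list_alt
    rw [PySem.List.pyRange_one_eq_nil hneg.le]
    simp only [PySem.List.pyRange_one_eq_nil (pv_neg_case x n hneg), List.map_nil,
      List.foldl_nil]
  · obtain ⟨n', rfl⟩ : ∃ n' : Nat, n = (n' : Int) :=
      ⟨n.toNat, (Int.toNat_of_nonneg hpos.le).symm⟩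
    have hn' : 0 < n' := by exact_mod_cast hpos
    have hdvd' : n' ∣ x.length := by exact_mod_cast hdvd
    have hlen : x.length = (x.length / n') * n' := (Nat.div_mul_cancel hdvd').symm
    have hm : PySem.Int.floordiv (x.length : Int) (n' : Int) = ((x.length / n' : Nat) : Int) :=
      PySem.Int.floordiv_natCast _ _
    rw [pvA_canon x n' (x.length / n') hm, pvB_canon x n' (x.length / n') hn' hlen hm]
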